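-- pv_equiv track=rewrite | github.com/impredicative/newssurvey | src/newssurvey/util/dict.py | dereference_dict
-- ===== SOURCE A (Python) =====
-- def dereference_dict(input_dict: dict[str, str]) -> dict[str, str]:
--     """Return a resolved version of the input dictionary, where each key is associated with its terminal value.
--
--     In the input dictionary, values may be other keys.
--     This function resolves the dictionary by following the chain of keys until it reaches a terminal value.
--     If a key points to itself or is involved in a cycle, it is omitted from the output.
--
--     Parameters:
--     - input_dict (dict[str, str]): A dictionary where the keys and values are strings. The values can either be terminal values or other keys in the dictionary.
--
--     Returns:
--     - dict[str, str]: A dictionary where each key is associated with its resolved terminal value. Keys involved in cycles are not included.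
--
--     Example:
--     >>> dereference_dict({'a': 'b', 'b': 'c', 'c': 'a',    'd': 'e', 'e': 'f', 'f': 'g',    'h': 'i', 'i': 'h',    'j': 'j',    'k': 'l',     'm': 'n', 'n': 'o', 'o': 'n',    'p': 'q', 'q': 'r', 'r': 's', 's': 'q'})
--     {'d': 'g', 'e': 'g', 'f': 'g', 'k': 'l'}
--     """
--     output_dict = {}
--     for start_key, start_value in input_dict.items():
--         current_key, current_value = start_key, start_value
--         visited = set()
--
--         while True:
--             if current_key in visited:
--                 break
--             visited.add(current_key)
--
--             if current_value in input_dict: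
--                 current_key, current_value = current_value, input_dict[current_value]
--             else:
--                 output_dict[start_key] = current_value
--                 break
--
--     return output_dict
-- ===== SOURCE B (Python) =====
-- def dereference_dict(input_dict: dict[str, str]) -> dict[str, str]:
--     """Resolve each key to its terminal value by pointer doubling: repeatedly
--     replace every value by the value it points to, doubling the chain length
--     covered each round, until the covered length reaches len(input_dict)."""
--     n = len(input_dict)
--     jump = dict(input_dict)
--     steps = 1
--     while steps < n:
--         jump = {k: jump[v] if v in jump else v for k, v in jump.items()}
--         steps *= 2
--     return {k: v for k, v in jump.items() if v not in input_dict}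
-- ===== Notes on version B (the rewrite author's own statement) =====
-- stated objective: alternative
-- what changed: A resolves every key independently by walking its chain with a per-key visited set; B runs whole-dict pointer-doubling rounds (each round replaces every value by the value it points to), so after ceil(log2 n) rounds every value is terminal or provably in a cycle, then one filter builds the output.
import Mathlib
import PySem

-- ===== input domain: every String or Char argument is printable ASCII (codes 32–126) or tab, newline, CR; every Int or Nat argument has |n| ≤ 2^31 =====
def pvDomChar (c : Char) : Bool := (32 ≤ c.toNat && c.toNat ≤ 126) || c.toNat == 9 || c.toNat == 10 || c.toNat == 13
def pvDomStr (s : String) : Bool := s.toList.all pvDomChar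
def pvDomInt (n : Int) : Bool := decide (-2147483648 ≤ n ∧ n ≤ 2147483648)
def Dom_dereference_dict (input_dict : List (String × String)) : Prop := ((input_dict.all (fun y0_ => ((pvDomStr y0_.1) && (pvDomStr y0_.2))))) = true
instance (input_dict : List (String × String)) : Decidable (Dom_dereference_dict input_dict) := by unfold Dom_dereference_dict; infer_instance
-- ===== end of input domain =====

-- B replaces A's per-key chain walk (with a visited set) by whole-dict pointer-doubling rounds.

-- ===== PORT A =====
-- A's inner `while True` loop; the fuel (called with size+1) only makes the recursion
-- structural — A's visited-set break fires before the fuel can run out.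
def chainA (d : PySem.Dict String String) (fuel : Nat) (visited : PySem.Set String)
    (ck cv : String) : Option String :=
  match fuel with
  | 0 => none
  | fuel + 1 =>
    if visited.contains ck then none
    else
      match d.get? cv with
      | some nv => chainA d fuel (visited.add ck) cv nv
      | none => some cv

def dereference_dict (input_dict : List (String × String)) : List (String × String) :=
  let d := PySem.Dict.ofList input_dict
  (d.items.foldl (fun out kv =>
      match chainA d (d.size + 1) PySem.Set.empty kv.1 kv.2 with
      | some t => out.insert kv.1 t
      | none => out) PySem.Dict.empty).items

-- ===== PORT B =====
-- one round of `{k: jump[v] if v in jump else v for k, v in jump.items()}`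
def jumpRound (jump : PySem.Dict String String) : PySem.Dict String String :=
  PySem.Dict.mk (jump.items.map (fun kv =>
    (kv.1, if jump.contains kv.2 then jump.getD kv.2 "" else kv.2)))

-- B's `while steps < n` loop (steps starts at 1 and doubles; `0 < steps` only justifies termination)
def doubleLoop (n : Nat) (jump : PySem.Dict String String) (steps : Nat) :
    PySem.Dict String String :=
  if h : 0 < steps ∧ steps < n then doubleLoop n (jumpRound jump) (steps * 2) else jump
  termination_by n - steps
  decreasing_by omega

def dereference_dict_alt (input_dict : List (String × String)) : List (String × String) :=
  let d := PySem.Dict.ofList input_dict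
  let jump := doubleLoop d.size d 1
  jump.items.filter (fun kv => !(d.contains kv.2))

-- ===== PRECONDITION & SPEC =====
def Spec_dereference_dict (input_dict : List (String × String)) (out : List (String × String)) : Prop := out = dereference_dict_alt input_dict
instance (input_dict : List (String × String)) (out : List (String × String)) : Decidable (Spec_dereference_dict input_dict out) := by unfold Spec_dereference_dict; infer_instance

-- ===== CLAIM (what is proved, stated in full; the proofs are below) =====
def Claim_equal_dereference_dict : Prop := ∀ (input_dict : List (String × String)), Dom_dereference_dict input_dict → Spec_dereference_dict input_dict (dereference_dict input_dict)

-- ===== LEMMAS AND PROOFS =====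

-- the successor map both programs walk: follow a key to its value, fix non-keys
def gstep (d : PySem.Dict String String) (x : String) : String :=
  if d.contains x then d.getD x "" else x

theorem gstep_of_not_contains {d : PySem.Dict String String} {x : String}
    (h : d.contains x = false) : gstep d x = x := by simp [gstep, h]

theorem gstep_of_contains {d : PySem.Dict String String} {x : String}
    (h : d.contains x = true) : gstep d x = d.getD x "" := by simp [gstep, h]

theorem get?_of_contains (d : PySem.Dict String String) (x : String)
    (h : d.contains x = true) : d.get? x = some (d.getD x "") := by
  rw [PySem.Dict.contains_eq_isSome_get?] at h
  rcases Option.isSome_iff_exists.mp h with ⟨w, hw⟩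
  rw [PySem.Dict.getD_eq_get?_getD, hw]; rfl

theorem get?_of_not_contains (d : PySem.Dict String String) (x : String)
    (h : d.contains x = false) : d.get? x = none := by
  rw [PySem.Dict.contains_eq_isSome_get?] at h
  exact Option.not_isSome_iff_eq_none.mp (by simp [h])

-- a walk that returns to its start never leaves the keys, so it cannot have an exit point later
theorem no_return (d : PySem.Dict String String) {ck : String} {p j₀ : Nat}
    (hp : 0 < p) (hplt : p < j₀) (hret : (gstep d)^[p] ck = ck)
    (h1 : d.contains ((gstep d)^[j₀] ck) = false)
    (h2 : ∀ i < j₀, d.contains ((gstep d)^[i] ck) = true) : False := by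
  have hmul : ∀ a : Nat, (gstep d)^[a * p] ck = ck := by
    intro a
    induction a with
    | zero => simp
    | succ a ih =>
      have h : (a + 1) * p = p + a * p := by ring
      rw [h, Function.iterate_add_apply, ih, hret]
  have hdecomp : (gstep d)^[j₀] ck = (gstep d)^[j₀ % p] ck := by
    conv_lhs => rw [show j₀ = j₀ % p + j₀ / p * p from (Nat.mod_add_div' j₀ p).symm]
    rw [Function.iterate_add_apply, hmul]
  have h := h2 (j₀ % p) (lt_trans (Nat.mod_lt _ hp) hplt)
  rw [← hdecomp, h1] at h
  exact Bool.false_ne_true h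

-- the exit index is at most the number of keys (the prefix is a list of distinct keys)
theorem exit_le_size (d : PySem.Dict String String) {ck : String} {j₀ : Nat}
    (h1 : d.contains ((gstep d)^[j₀] ck) = false)
    (h2 : ∀ i < j₀, d.contains ((gstep d)^[i] ck) = true) : j₀ ≤ d.size := by
  have hnodup : ((List.range j₀).map (fun i => (gstep d)^[i] ck)).Nodup := by
    refine List.Nodup.map_on ?_ List.nodup_range
    intro i hi j hj hij
    simp only [List.mem_range] at hi hj
    by_contra hne
    rcases Nat.lt_or_ge i j with hlt | hge
    · have hret : (gstep d)^[j - i] ((gstep d)^[i] ck) = (gstep d)^[i] ck := by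
        rw [← Function.iterate_add_apply, Nat.sub_add_cancel (Nat.le_of_lt hlt), hij]
      refine no_return d (ck := (gstep d)^[i] ck) (p := j - i) (j₀ := j₀ - i)
        (by omega) (by omega) hret ?_ ?_
      · rw [← Function.iterate_add_apply, Nat.sub_add_cancel (Nat.le_of_lt hi)]; exact h1
      · intro t ht; rw [← Function.iterate_add_apply]; exact h2 _ (by omega)
    · have hlt : j < i := by omega
      have hret : (gstep d)^[i - j] ((gstep d)^[j] ck) = (gstep d)^[j] ck := by
        rw [← Function.iterate_add_apply, Nat.sub_add_cancel (Nat.le_of_lt hlt), ← hij]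
      refine no_return d (ck := (gstep d)^[j] ck) (p := i - j) (j₀ := j₀ - j)
        (by omega) (by omega) hret ?_ ?_
      · rw [← Function.iterate_add_apply, Nat.sub_add_cancel (Nat.le_of_lt hj)]; exact h1
      · intro t ht; rw [← Function.iterate_add_apply]; exact h2 _ (by omega)
  have hsub : ((List.range j₀).map (fun i => (gstep d)^[i] ck)) ⊆ d.keys := by
    intro y hy
    rcases List.mem_map.mp hy with ⟨i, hi, rfl⟩
    exact (PySem.Dict.contains_iff_mem_keys d _).mp (h2 i (List.mem_range.mp hi))
  have hle := (List.subperm_of_subset hnodup hsub).length_le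
  simpa [PySem.Dict.keys, PySem.Dict.size] using hle

-- once the walk has left the keys it stays put
theorem iterate_stable (d : PySem.Dict String String) {x : String} {j : Nat}
    (h : d.contains ((gstep d)^[j] x) = false) {m : Nat} (hm : j ≤ m) :
    (gstep d)^[m] x = (gstep d)^[j] x := by
  obtain ⟨t, rfl⟩ : ∃ t, m = t + j := ⟨m - j, by omega⟩
  rw [Function.iterate_add_apply]
  exact Function.iterate_fixed (gstep_of_not_contains h) t

-- A's chain loop returns none whenever the walk never leaves the keys
theorem chainA_cyclic (d : PySem.Dict String String) :
    ∀ (fuel : Nat) (V : PySem.Set String) (ck : String),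
    (∀ j, d.contains ((gstep d)^[j] ck) = true) →
    chainA d fuel V ck (gstep d ck) = none := by
  intro fuel
  induction fuel with
  | zero => intro V ck _; rfl
  | succ fuel ih =>
    intro V ck hall
    rw [chainA]
    by_cases hv : V.contains ck = true
    · rw [if_pos hv]
    · rw [if_neg hv]
      have hck1 : d.contains (gstep d ck) = true := by
        have h := hall 1; simpa using h
      rw [get?_of_contains d _ hck1]
      have hg : d.getD (gstep d ck) "" = gstep d (gstep d ck) := (gstep_of_contains hck1).symm
      simp only [hg]
      exact ih (V.add ck) (gstep d ck) (fun j => by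
        have h := hall (j + 1); rwa [Function.iterate_add_apply, Function.iterate_one] at h)

-- A's chain loop returns the exit value when the walk leaves the keys at index j₀,
-- provided nothing on the walk before the exit was already visited and the fuel exceeds j₀
theorem chainA_term (d : PySem.Dict String String) :
    ∀ (j₀ fuel : Nat) (V : PySem.Set String) (ck : String),
    d.contains ((gstep d)^[j₀] ck) = false →
    (∀ i < j₀, d.contains ((gstep d)^[i] ck) = true) →
    (∀ i < j₀, ((gstep d)^[i] ck) ∉ V) →
    j₀ < fuel →
    d.contains ck = true →
    chainA d fuel V ck (gstep d ck) = some ((gstep d)^[j₀] ck) := by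
  intro j₀
  induction j₀ with
  | zero =>
    intro fuel V ck h1 h2 h3 h4 hck
    rw [Function.iterate_zero_apply] at h1
    rw [h1] at hck
    exact absurd hck Bool.false_ne_true
  | succ m ih =>
    intro fuel V ck h1 h2 h3 h4 hck
    obtain ⟨f, rfl⟩ : ∃ f, fuel = f + 1 := ⟨fuel - 1, by omega⟩
    rw [chainA]
    have hv : ¬ V.contains ck = true := by
      rw [PySem.Set.contains_iff]
      have h := h3 0 (Nat.succ_pos m)
      simpa using h
    rw [if_neg hv]
    by_cases hcvk : d.contains (gstep d ck) = true
    · rw [get?_of_contains d _ hcvk]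
      have hg : d.getD (gstep d ck) "" = gstep d (gstep d ck) := (gstep_of_contains hcvk).symm
      simp only [hg]
      have hres := ih f (V.add ck) (gstep d ck)
        (by rw [← Function.iterate_succ_apply]; exact h1)
        (fun i hi => by rw [← Function.iterate_succ_apply]; exact h2 (i + 1) (by omega))
        (fun i hi => by
          rw [← Function.iterate_succ_apply]
          intro hmem
          rcases (PySem.Set.mem_add _ _ _).mp hmem with hin | heq
          · exact h3 (i + 1) (by omega) hin
          · exact no_return d (p := i + 1) (j₀ := m + 1) (Nat.succ_pos i) (by omega) heq h1 h2)
        (by omega) hcvk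
      rw [hres, ← Function.iterate_succ_apply]
    · have hm0 : m = 0 := by
        by_contra hm
        have h := h2 1 (by omega)
        rw [Function.iterate_one] at h
        exact absurd h hcvk
      subst hm0
      have hcv : d.contains (gstep d ck) = false := by
        cases hb : d.contains (gstep d ck)
        · rfl
        · exact absurd hb hcvk
      rw [get?_of_not_contains d _ hcv, Function.iterate_one]

-- B-side: c rounds of pointer doubling advance every value 2^c - 1 saturated steps
theorem rounds_items (d : PySem.Dict String String) (hnd : d.keys.Nodup) :
    ∀ c : Nat, (jumpRound^[c] d).items
      = d.items.map (fun kv => (kv.1, (gstep d)^[2 ^ c - 1] kv.2)) := by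
  intro c
  induction c with
  | zero =>
    simp only [Function.iterate_zero, id_eq, pow_zero, Nat.sub_self, Function.iterate_zero]
    simp
  | succ c ih =>
    have h2c : 1 ≤ 2 ^ c := Nat.one_le_two_pow
    have hkeys : (jumpRound^[c] d).keys = d.keys := by
      simp only [PySem.Dict.keys, ih, List.map_map]
      rfl
    have hJnd : (jumpRound^[c] d).keys.Nodup := by rw [hkeys]; exact hnd
    have hcont : ∀ y, (jumpRound^[c] d).contains y = d.contains y := by
      intro y
      rw [PySem.Dict.contains_eq_decide_mem_keys, PySem.Dict.contains_eq_decide_mem_keys, hkeys]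
    have hgetD : ∀ y, d.contains y = true →
        (jumpRound^[c] d).getD y "" = (gstep d)^[2 ^ c - 1] (d.getD y "") := by
      intro y hy
      have hmem : y ∈ d.keys := (PySem.Dict.contains_iff_mem_keys d y).mp hy
      obtain ⟨v2, hpair⟩ : ∃ x, (y, x) ∈ d.items := by simpa [PySem.Dict.keys] using hmem
      have hvd : d.getD y "" = v2 := PySem.Dict.getD_of_mem_items d hpair hnd ""
      have hJpair : (y, (gstep d)^[2 ^ c - 1] v2) ∈ (jumpRound^[c] d).items := by
        rw [ih]; exact List.mem_map.mpr ⟨(y, v2), hpair, rfl⟩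
      rw [PySem.Dict.getD_of_mem_items _ hJpair hJnd "", hvd]
    rw [Function.iterate_succ_apply', jumpRound, ih]
    show (d.items.map _).map _ = _
    rw [List.map_map]
    refine List.map_congr_left ?_
    intro kv hkv
    simp only [Function.comp_apply]
    by_cases hy : d.contains ((gstep d)^[2 ^ c - 1] kv.2) = true
    · rw [hcont, if_pos hy, hgetD _ hy]
      have hstep : (gstep d)^[2 ^ c - 1] (d.getD ((gstep d)^[2 ^ c - 1] kv.2) "")
          = (gstep d)^[2 ^ c - 1 + 1] ((gstep d)^[2 ^ c - 1] kv.2) := by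
        rw [Function.iterate_succ_apply, gstep_of_contains hy]
      rw [hstep, ← Function.iterate_add_apply]
      have harith : 2 ^ c - 1 + 1 + (2 ^ c - 1) = 2 ^ (c + 1) - 1 := by
        rw [pow_succ]; omega
      rw [harith]
    · have hyf : d.contains ((gstep d)^[2 ^ c - 1] kv.2) = false := by
        cases hb : d.contains ((gstep d)^[2 ^ c - 1] kv.2)
        · rfl
        · exact absurd hb hy
      rw [hcont, if_neg hy]
      have hsat : (gstep d)^[2 ^ (c + 1) - 1] kv.2 = (gstep d)^[2 ^ c - 1] kv.2 :=
        iterate_stable d hyf (by rw [pow_succ]; omega)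
      rw [hsat]

-- B's while-loop is some number of rounds, enough of them to cover all keys
theorem doubleLoop_eq (n : Nat) :
    ∀ (k : Nat) (j : PySem.Dict String String) (s : Nat), 0 < s → n - s ≤ k →
    ∃ c, doubleLoop n j s = jumpRound^[c] j ∧ n ≤ s * 2 ^ c := by
  intro k
  induction k with
  | zero =>
    intro j s hs hk
    rw [doubleLoop, dif_neg (by omega)]
    exact ⟨0, rfl, by simpa using (by omega : n ≤ s)⟩
  | succ k ih =>
    intro j s hs hk
    by_cases hlt : s < n
    · rw [doubleLoop, dif_pos ⟨hs, hlt⟩]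
      obtain ⟨c, hc1, hc2⟩ := ih (jumpRound j) (s * 2) (by omega) (by omega)
      refine ⟨c + 1, ?_, ?_⟩
      · rw [hc1, ← Function.iterate_succ_apply]
      · have h : s * 2 ^ (c + 1) = s * 2 * 2 ^ c := by ring
        omega
    · rw [doubleLoop, dif_neg (by omega)]
      exact ⟨0, rfl, by simpa using (by omega : n ≤ s)⟩

-- A's output loop: conditional insertion of fresh distinct keys appends, i.e. is a filterMap
theorem foldl_condInsert (f : String × String → Option String) :
    ∀ (l : List (String × String)) (acc : PySem.Dict String String),
    (l.map Prod.fst).Nodup → (∀ kv ∈ l, acc.contains kv.1 = false) →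
    (l.foldl (fun out kv =>
        match f kv with
        | some t => out.insert kv.1 t
        | none => out) acc).items
      = acc.items ++ l.filterMap (fun kv => (f kv).map (fun t => (kv.1, t))) := by
  intro l
  induction l with
  | nil => intro acc _ _; simp
  | cons kv l ih =>
    intro acc hnd hfresh
    simp only [List.map_cons, List.nodup_cons] at hnd
    obtain ⟨hnotmem, hndtail⟩ := hnd
    simp only [List.foldl_cons, List.filterMap_cons]
    rcases hf : f kv with _ | t
    · simp only [Option.map_none]
      exact ih acc hndtail (fun kv' h => hfresh kv' (List.mem_cons_of_mem _ h))
    · simp only [Option.map_some]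
      have hfr : acc.contains kv.1 = false := hfresh kv List.mem_cons_self
      have hfresh' : ∀ kv' ∈ l, (acc.insert kv.1 t).contains kv'.1 = false := by
        intro kv' h
        rw [PySem.Dict.contains_insert]
        have hne : kv'.1 ≠ kv.1 := by
          intro heq
          exact hnotmem (heq ▸ List.mem_map.mpr ⟨kv', h, rfl⟩)
        simp [hne, hfresh kv' (List.mem_cons_of_mem _ h)]
      rw [ih (acc.insert kv.1 t) hndtail hfresh',
        PySem.Dict.items_insert_of_not_contains acc t hfr, List.append_assoc]
      rfl

-- filter after map is a filterMap over the original list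
theorem map_filter_eq_filterMap {α β : Type} (φ : α → β) (p : β → Bool) :
    ∀ l : List α, (l.map φ).filter p = l.filterMap (fun x => if p (φ x) then some (φ x) else none) := by
  intro l
  induction l with
  | nil => rfl
  | cons x l ih =>
    simp only [List.map_cons, List.filter_cons, List.filterMap_cons]
    by_cases hp : p (φ x) = true
    · rw [if_pos hp, if_pos hp, ih]
    · rw [if_neg hp, if_neg hp, ih]

-- ===== VERDICT (by name: the statement is the Claim_ definition above) =====
theorem dereference_dict_spec : Claim_equal_dereference_dict := by
  intro input _
  unfold Spec_dereference_dict dereference_dict dereference_dict_alt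
  simp only []
  set d := PySem.Dict.ofList input with hd
  have hnd : d.keys.Nodup := PySem.Dict.nodup_keys_ofList input
  have hA := foldl_condInsert
    (fun kv => chainA d (d.size + 1) PySem.Set.empty kv.1 kv.2) d.items PySem.Dict.empty
    (by simpa [PySem.Dict.keys] using hnd) (fun kv _ => PySem.Dict.contains_empty kv.1)
  rw [hA]
  obtain ⟨c, hdl, hc⟩ := doubleLoop_eq d.size d.size d 1 Nat.one_pos (by omega)
  rw [hdl, rounds_items d hnd c, map_filter_eq_filterMap]
  have hsz : d.size ≤ 2 ^ c := by simpa using hc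
  have h2c : 1 ≤ 2 ^ c := Nat.one_le_two_pow
  simp only [show PySem.Dict.empty.items = ([] : List (String × String)) from rfl,
    List.nil_append]
  refine List.filterMap_congr ?_
  intro kv hkv
  have hpair : (kv.1, kv.2) ∈ d.items := hkv
  have hck : d.contains kv.1 = true :=
    (PySem.Dict.contains_iff_mem_keys d kv.1).mpr
      (by simp only [PySem.Dict.keys]; exact List.mem_map.mpr ⟨kv, hkv, rfl⟩)
  have hkv2 : kv.2 = gstep d kv.1 := by
    rw [gstep_of_contains hck, PySem.Dict.getD_of_mem_items d hpair hnd ""]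
  have hM1 : 2 ^ c - 1 + 1 = 2 ^ c := by omega
  have hiter : (gstep d)^[2 ^ c - 1] kv.2 = (gstep d)^[2 ^ c] kv.1 := by
    rw [hkv2, ← Function.iterate_succ_apply, Nat.succ_eq_add_one, hM1]
  by_cases hterm : ∃ j, d.contains ((gstep d)^[j] kv.1) = false
  · have h1 := Nat.find_spec hterm
    have h2 : ∀ i < Nat.find hterm, d.contains ((gstep d)^[i] kv.1) = true := by
      intro i hi
      have h := Nat.find_min hterm hi
      simpa using h
    have hj₀ : Nat.find hterm ≤ d.size := exit_le_size d h1 h2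
    have hAv : chainA d (d.size + 1) PySem.Set.empty kv.1 kv.2
        = some ((gstep d)^[Nat.find hterm] kv.1) := by
      rw [hkv2]
      exact chainA_term d (Nat.find hterm) (d.size + 1) PySem.Set.empty kv.1 h1 h2
        (fun i _ => by simp [PySem.Set.empty]) (by omega) hck
    have hBv : (gstep d)^[2 ^ c - 1] kv.2 = (gstep d)^[Nat.find hterm] kv.1 := by
      rw [hiter]
      exact iterate_stable d h1 (by omega)
    simp only [hAv, Option.map_some, hBv, h1, Bool.not_false, if_pos]
  · rw [not_exists] at hterm
    have hall : ∀ j, d.contains ((gstep d)^[j] kv.1) = true := by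
      intro j
      have h := hterm j
      cases hb : d.contains ((gstep d)^[j] kv.1)
      · exact absurd hb h
      · rfl
    have hAv : chainA d (d.size + 1) PySem.Set.empty kv.1 kv.2 = none := by
      rw [hkv2]
      exact chainA_cyclic d (d.size + 1) PySem.Set.empty kv.1 hall
    have hBv : d.contains ((gstep d)^[2 ^ c - 1] kv.2) = true := by rw [hiter]; exact hall _
    simp only [hAv, Option.map_none, hBv, Bool.not_true]
    simp
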